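-- pv_equiv track=rewrite | github.com/PaulllK/Strong-Password-Problem | solution.py | getMinimumOperationsForStrongPassword
-- ===== SOURCE A (Python) =====
-- def getMinimumOperationsForStrongPassword(s):
--
--     nrOfMissingCharacters = 0
--
--     if not any(c.islower() for c in s):
--         nrOfMissingCharacters += 1
--     if not any(c.isupper() for c in s):
--         nrOfMissingCharacters += 1
--     if not any(c.isdigit() for c in s):
--         nrOfMissingCharacters += 1
--
--     nrOfThreeRepeating = 0 # number of three repeating characters in a row
--     secvSize = 1
--
--     for i in range(1, len(s)):
--         if s[i] == s[i-1]:
--             secvSize+=1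
--         else:
--
--             nrOfThreeRepeating+=secvSize//3 # number of three repeating characters in a row from all repeating characters
--             secvSize = 1
--
--     nrOfThreeRepeating+=secvSize//3 # the final repeating characters in a row
--
--     nrOfOperations = max(nrOfMissingCharacters, nrOfThreeRepeating)
--     sizeDifference = max(0, 6 - len(s))  # minimum length is 6
--     sizeDifference = max(sizeDifference, len(s) - 20)  # maximum length is 20
--     nrOfOperations = max(nrOfOperations, sizeDifference)
--
--     return nrOfOperations
-- ===== SOURCE B (Python) =====
-- def getMinimumOperationsForStrongPassword(s):
--     mask = 0
--     for c in s:
--         if c.islower():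
--             mask |= 1
--         elif c.isupper():
--             mask |= 2
--         elif c.isdigit():
--             mask |= 4
--     missing = 3 - ((mask & 1) + ((mask >> 1) & 1) + ((mask >> 2) & 1))
--     repeats = 0
--     i = 0
--     n = len(s)
--     while i + 2 < n:
--         if s[i] == s[i + 1] == s[i + 2]:
--             repeats += 1
--             i += 3
--         else:
--             i += 1
--     return max(missing, repeats, 6 - n, n - 20, 0)
-- ===== Notes on version B (the rewrite author's own statement) =====
-- stated objective: alternative
-- what changed: B replaces A's three any()-scans and run-length accumulation (secvSize with //3 flush per run) by a bitmask of present character classes and a greedy index-jumping scan that looks for s[i]==s[i+1]==s[i+2], counts one fix and skips 3 positions on a hit; the length penalty and final max are computed in one expression.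
import Mathlib
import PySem

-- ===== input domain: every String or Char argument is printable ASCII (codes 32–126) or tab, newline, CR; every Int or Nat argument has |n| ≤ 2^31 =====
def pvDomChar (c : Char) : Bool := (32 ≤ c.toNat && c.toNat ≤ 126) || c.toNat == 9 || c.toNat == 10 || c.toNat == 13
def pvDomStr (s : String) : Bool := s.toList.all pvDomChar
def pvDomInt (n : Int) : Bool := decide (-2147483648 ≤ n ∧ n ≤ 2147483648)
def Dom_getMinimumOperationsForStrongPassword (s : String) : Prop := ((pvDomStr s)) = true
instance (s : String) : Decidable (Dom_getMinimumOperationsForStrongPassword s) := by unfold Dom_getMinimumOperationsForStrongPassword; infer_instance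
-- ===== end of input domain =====

-- B replaces A's any()-scans and run-length accumulation by a class bitmask and a greedy
-- triple-skipping scan (count a fix and jump 3 on s[i]==s[i+1]==s[i+2]); objective: alternative algorithm.

-- ===== PORT A =====
-- A's for-loop body over range(1, len(s)): state (nrOfThreeRepeating, secvSize)
def idxStep (cs : List Char) (st : Int × Int) (i : Int) : Int × Int :=
  if PySem.List.pyGet? cs i = PySem.List.pyGet? cs (i - 1) then (st.1, st.2 + 1)
  else (st.1 + PySem.Int.floordiv st.2 3, 1)

def getMinimumOperationsForStrongPassword (s : String) : Int :=
  let cs := s.toList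
  let m0 : Int := 0
  let m1 := if ¬ (cs.any fun c => PySem.Chars.islower c) then m0 + 1 else m0
  let m2 := if ¬ (cs.any fun c => PySem.Chars.isupper c) then m1 + 1 else m1
  let m3 := if ¬ (cs.any fun c => PySem.Chars.isdigit c) then m2 + 1 else m2
  let st := (PySem.List.pyRange 1 (cs.length : Int) 1).foldl (idxStep cs) (0, 1)
  let rep := st.1 + PySem.Int.floordiv st.2 3
  let ops := max m3 rep
  let sd := max 0 (6 - (cs.length : Int))
  let sd' := max sd ((cs.length : Int) - 20)
  max ops sd'

-- ===== PORT B =====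
-- B's first loop: OR the class bit of each character into a mask (a Python int, always in 0..7)
def maskStep (mask : Nat) (c : Char) : Nat :=
  if PySem.Chars.islower c then mask ||| 1
  else if PySem.Chars.isupper c then mask ||| 2
  else if PySem.Chars.isdigit c then mask ||| 4
  else mask

-- B's while loop over i with i+2 < n: recursion on the current suffix s[i:]
def greedyRepeats : List Char → Int
  | c1 :: c2 :: c3 :: t =>
      if c1 = c2 ∧ c2 = c3 then 1 + greedyRepeats t else greedyRepeats (c2 :: c3 :: t)
  | _ => 0

def getMinimumOperationsForStrongPassword_alt (s : String) : Int :=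
  let cs := s.toList
  let mask := cs.foldl maskStep 0
  let missing : Int := 3 - (((mask &&& 1 : Nat) : Int) + (((mask >>> 1) &&& 1 : Nat) : Int) + (((mask >>> 2) &&& 1 : Nat) : Int))
  let repeats := greedyRepeats cs
  let n : Int := (cs.length : Int)
  max (max (max (max missing repeats) (6 - n)) (n - 20)) 0

-- ===== PRECONDITION & SPEC =====
def Spec_getMinimumOperationsForStrongPassword (s : String) (out : Int) : Prop := out = getMinimumOperationsForStrongPassword_alt s
instance (s : String) (out : Int) : Decidable (Spec_getMinimumOperationsForStrongPassword s out) := by unfold Spec_getMinimumOperationsForStrongPassword; infer_instance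

-- ===== CLAIM (what is proved, stated in full; the proofs are below) =====
def Claim_equal_getMinimumOperationsForStrongPassword : Prop := ∀ (s : String), Dom_getMinimumOperationsForStrongPassword s → Spec_getMinimumOperationsForStrongPassword s (getMinimumOperationsForStrongPassword s)

-- ===== LEMMAS AND PROOFS =====

-- the three presence flags, as a fold (characterises both A's any-scans and B's mask loop)
def fstep (st : Bool × Bool × Bool) (c : Char) : Bool × Bool × Bool :=
  if PySem.Chars.islower c then (true, st.2.1, st.2.2)
  else if PySem.Chars.isupper c then (st.1, true, st.2.2)
  else if PySem.Chars.isdigit c then (st.1, st.2.1, true)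
  else st

def encode (st : Bool × Bool × Bool) : Nat :=
  (if st.1 then 1 else 0) ||| (if st.2.1 then 2 else 0) ||| (if st.2.2 then 4 else 0)

-- run-length recursion on the tail, carrying the previous character (A's loop semantics)
def pairsFold : Char → List Char → Int → Int → Int × Int
  | _, [], rep, run => (rep, run)
  | p, c :: t, rep, run =>
    if c = p then pairsFold c t rep (run + 1)
    else pairsFold c t (rep + PySem.Int.floordiv run 3) 1

lemma lower_not_upper {c : Char} (h : PySem.Chars.islower c = true) : PySem.Chars.isupper c = false := by
  simp only [PySem.Chars.isupper]
  simp only [PySem.Chars.islower, Bool.and_eq_true, decide_eq_true_eq] at h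
  simp only [Bool.and_eq_false_iff, decide_eq_false_iff_not, not_le]
  right; exact lt_of_lt_of_le (by decide) h.1

lemma lower_not_digit {c : Char} (h : PySem.Chars.islower c = true) : PySem.Chars.isdigit c = false := by
  simp only [PySem.Chars.isdigit]
  simp only [PySem.Chars.islower, Bool.and_eq_true, decide_eq_true_eq] at h
  simp only [Bool.and_eq_false_iff, decide_eq_false_iff_not, not_le]
  right; exact lt_of_lt_of_le (by decide) h.1

lemma upper_not_digit {c : Char} (h : PySem.Chars.isupper c = true) : PySem.Chars.isdigit c = false := by
  simp only [PySem.Chars.isdigit]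
  simp only [PySem.Chars.isupper, Bool.and_eq_true, decide_eq_true_eq] at h
  simp only [Bool.and_eq_false_iff, decide_eq_false_iff_not, not_le]
  right; exact lt_of_lt_of_le (by decide) h.1

lemma fold_fstep (cs : List Char) : ∀ (a b d : Bool),
    cs.foldl fstep (a, b, d) =
      (a || cs.any (fun c => PySem.Chars.islower c),
       b || cs.any (fun c => PySem.Chars.isupper c),
       d || cs.any (fun c => PySem.Chars.isdigit c)) := by
  induction cs with
  | nil => intro a b d; simp
  | cons c t ih =>
    intro a b d
    simp only [List.foldl_cons, List.any_cons]
    by_cases hl : PySem.Chars.islower c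
    · rw [show fstep (a, b, d) c = (true, b, d) from by simp [fstep, hl], ih]
      simp [hl, lower_not_upper hl, lower_not_digit hl]
    · by_cases hu : PySem.Chars.isupper c
      · rw [show fstep (a, b, d) c = (a, true, d) from by simp [fstep, hl, hu], ih]
        simp [hl, hu, upper_not_digit hu]
      · by_cases hd : PySem.Chars.isdigit c
        · rw [show fstep (a, b, d) c = (a, b, true) from by simp [fstep, hl, hu, hd], ih]
          simp [hl, hu, hd]
        · rw [show fstep (a, b, d) c = (a, b, d) from by simp [fstep, hl, hu, hd], ih]
          simp [hl, hu, hd]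

-- B's mask fold tracks exactly the encoded flag fold
lemma fold_mask (cs : List Char) : ∀ (st : Bool × Bool × Bool),
    cs.foldl maskStep (encode st) = encode (cs.foldl fstep st) := by
  induction cs with
  | nil => intro st; rfl
  | cons c t ih =>
    intro st
    simp only [List.foldl_cons]
    have h : maskStep (encode st) c = encode (fstep st c) := by
      obtain ⟨a, b, d⟩ := st
      cases a <;> cases b <;> cases d <;>
        simp only [maskStep, fstep, encode] <;> split_ifs <;> first | decide | simp_all
    rw [h, ih]

-- side condition "rest does not start with c"
def headNe (c : Char) (rest : List Char) : Prop := ∀ d t', rest = d :: t' → d ≠ c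

lemma greedy_drop_one (c : Char) (rest : List Char) (h : headNe c rest) :
    greedyRepeats (c :: rest) = greedyRepeats rest := by
  match rest with
  | [] => rfl
  | [d] => rfl
  | d :: e :: t =>
    have hd : d ≠ c := h d (e :: t) rfl
    simp only [greedyRepeats]
    rw [if_neg]
    rintro ⟨h1, _⟩; exact hd h1.symm

-- the greedy triple-skip on a maximal run of m copies of c counts exactly m / 3
theorem greedy_run (m : Nat) (c : Char) (rest : List Char) (h : headNe c rest) :
    greedyRepeats (List.replicate m c ++ rest) = ((m / 3 : Nat) : Int) + greedyRepeats rest := by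
  match m with
  | 0 => simp
  | 1 =>
    simp only [List.replicate, List.cons_append, List.nil_append]
    rw [greedy_drop_one c rest h]; simp
  | 2 =>
    simp only [List.replicate, List.cons_append, List.nil_append]
    match rest with
    | [] => rfl
    | d :: t =>
      have hd : d ≠ c := h d t rfl
      simp only [greedyRepeats]
      rw [if_neg (by rintro ⟨_, h2⟩; exact hd h2.symm)]
      have := greedy_drop_one c (d :: t) h
      rw [this]; simp
  | (k+3) =>
    have e : List.replicate (k+3) c ++ rest = c :: c :: c :: (List.replicate k c ++ rest) := by
      simp [List.replicate_succ]
    rw [e]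
    rw [show greedyRepeats (c :: c :: c :: (List.replicate k c ++ rest)) =
        1 + greedyRepeats (List.replicate k c ++ rest) from by simp [greedyRepeats]]
    rw [greedy_run k c rest h]
    have : (k + 3) / 3 = k / 3 + 1 := by omega
    rw [this]
    push_cast
    ring

-- A's run-length fold, flushed at the end, equals B's greedy scan of the same suffix
lemma pairs_eq_greedy (t : List Char) : ∀ (p : Char) (rep : Int) (run : Nat),
    (pairsFold p t rep (run : Int)).1 + PySem.Int.floordiv (pairsFold p t rep (run : Int)).2 3 =
      rep + greedyRepeats (List.replicate run p ++ t) := by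
  induction t with
  | nil =>
    intro p rep run
    simp only [pairsFold]
    rw [greedy_run run p [] (by intro d t' h; cases h)]
    simp only [greedyRepeats]
    have : PySem.Int.floordiv (run : Int) 3 = ((run / 3 : Nat) : Int) := by
      simp only [PySem.Int.floordiv]
      rw [Int.fdiv_eq_ediv_of_nonneg _ (by norm_num : (0:Int) ≤ 3)]
      omega
    rw [this]; ring
  | cons c t ih =>
    intro p rep run
    by_cases hc : c = p
    · subst hc
      simp only [pairsFold, if_pos]
      have h := ih c rep (run + 1)
      have e : List.replicate (run + 1) c ++ t = List.replicate run c ++ c :: t := by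
        rw [List.replicate_succ', List.append_assoc]; rfl
      rw [e] at h
      push_cast at h ⊢
      rw [h]
    · simp only [pairsFold, if_neg hc]
      have hne : headNe p (c :: t) := by
        intro d t' h hdp; cases h; exact hc hdp
      rw [greedy_run run p (c :: t) hne]
      have h1 := ih c (rep + PySem.Int.floordiv (run : Int) 3) 1
      have e1 : List.replicate 1 c ++ t = c :: t := by simp
      rw [e1] at h1
      rw [show ((1 : Nat) : Int) = (1 : Int) from rfl] at h1
      rw [h1]
      have : PySem.Int.floordiv (run : Int) 3 = ((run / 3 : Nat) : Int) := by
        simp only [PySem.Int.floordiv]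
        rw [Int.fdiv_eq_ediv_of_nonneg _ (by norm_num : (0:Int) ≤ 3)]
        omega
      rw [this]; ring

-- A's index loop equals pairsFold on the tail
lemma fold_idx (t : List Char) : ∀ (pre : List Char) (p : Char) (rep run : Int),
    (PySem.List.pyRange ((pre.length : Int) + 1) ((pre.length : Int) + 1 + (t.length : Int)) 1).foldl
        (idxStep (pre ++ p :: t)) (rep, run) = pairsFold p t rep run := by
  induction t with
  | nil =>
    intro pre p rep run
    have hnil := PySem.List.pyRange_one_eq_nil
      (a := (pre.length : Int) + 1) (b := (pre.length : Int) + 1 + (([] : List Char).length : Int))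
      (by simp)
    rw [hnil]
    simp [pairsFold]
  | cons c t ih =>
    intro pre p rep run
    have hcons := PySem.List.pyRange_one_cons
      (a := (pre.length : Int) + 1) (b := (pre.length : Int) + 1 + ((c :: t).length : Int))
      (by simp)
    rw [hcons]
    simp only [List.foldl_cons]
    have hget1 : PySem.List.pyGet? (pre ++ p :: c :: t) ((pre.length : Int) + 1) = some c := by
      have := PySem.List.pyGet?_append_right (pre := pre) (ys := p :: c :: t) (k := 1)
      simpa using this
    have hget0 : PySem.List.pyGet? (pre ++ p :: c :: t) ((pre.length : Int) + 1 - 1) = some p := by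
      have h := PySem.List.pyGet?_append_length (pre := pre) (y := p) (ys := c :: t)
      simp only [add_sub_cancel_right]
      exact h
    have hstep : idxStep (pre ++ p :: c :: t) (rep, run) ((pre.length : Int) + 1) =
        if c = p then (rep, run + 1) else (rep + PySem.Int.floordiv run 3, 1) := by
      rw [idxStep, hget1, hget0]
      by_cases hc : c = p <;> simp [hc]
    have key : ∀ (rep' run' : Int),
        (PySem.List.pyRange ((pre.length : Int) + 1 + 1) ((pre.length : Int) + 1 + ((c :: t).length : Int)) 1).foldl
          (idxStep (pre ++ p :: c :: t)) (rep', run') = pairsFold c t rep' run' := by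
      intro rep' run'
      have h2 := ih (pre ++ [p]) c rep' run'
      have e1 : (((pre ++ [p]).length : Int) + 1) = (pre.length : Int) + 1 + 1 := by simp
      have e3 : (pre ++ [p]) ++ c :: t = pre ++ p :: c :: t := by simp
      rw [e1, e3] at h2
      have e4 : (pre.length : Int) + 1 + 1 + (t.length : Int) = (pre.length : Int) + 1 + ((c :: t).length : Int) := by
        simp; ring
      rw [e4] at h2
      exact h2
    rw [hstep]
    by_cases hc : c = p
    · rw [if_pos hc]
      have hp : pairsFold p (c :: t) rep run = pairsFold c t rep (run + 1) := by
        simp only [pairsFold, if_pos hc]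
      rw [hp]
      exact key rep (run + 1)
    · rw [if_neg hc]
      have hp : pairsFold p (c :: t) rep run = pairsFold c t (rep + PySem.Int.floordiv run 3) 1 := by
        simp only [pairsFold, if_neg hc]
      rw [hp]
      exact key (rep + PySem.Int.floordiv run 3) 1

lemma max_shuffle (m r a b : Int) :
    max (max m r) (max (max 0 a) b) = max (max (max (max m r) a) b) 0 := by
  omega

-- ===== VERDICT (by name: the statement is the Claim_ definition above) =====
theorem getMinimumOperationsForStrongPassword_spec : Claim_equal_getMinimumOperationsForStrongPassword := by
  intro s _
  unfold Spec_getMinimumOperationsForStrongPassword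
  unfold getMinimumOperationsForStrongPassword getMinimumOperationsForStrongPassword_alt
  have hmask : s.toList.foldl maskStep 0 = encode (s.toList.foldl fstep (false, false, false)) :=
    fold_mask s.toList (false, false, false)
  cases hcs : s.toList with
  | nil =>
    simp [PySem.List.pyRange_one_eq_nil, PySem.Int.floordiv, greedyRepeats]
  | cons c t =>
    rw [hcs] at hmask
    simp only []
    rw [hmask, fold_fstep]
    have hA : (PySem.List.pyRange 1 (((c :: t).length : Int)) 1).foldl (idxStep (c :: t)) (0, 1)
        = pairsFold c t 0 1 := by
      have h0 := fold_idx t [] c 0 1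
      have e : ((([] : List Char).length : Int) + 1 + (t.length : Int)) = (((c :: t).length : Nat) : Int) := by
        simp; ring
      rw [e] at h0
      simpa using h0
    rw [hA]
    have hrep : (pairsFold c t 0 ((1 : Nat) : Int)).1 +
        PySem.Int.floordiv (pairsFold c t 0 ((1 : Nat) : Int)).2 3 =
          0 + greedyRepeats (List.replicate 1 c ++ t) := pairs_eq_greedy t c 0 1
    simp only [List.replicate, List.cons_append, List.nil_append, Nat.cast_one, zero_add] at hrep
    rw [hrep]
    simp only [Bool.false_or]
    rw [max_shuffle]
    congr 1
    congr 1
    congr 1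
    cases (c :: t).any (fun c => PySem.Chars.islower c) <;>
      cases (c :: t).any (fun c => PySem.Chars.isupper c) <;>
        cases (c :: t).any (fun c => PySem.Chars.isdigit c) <;> rfl
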